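-- pv_equiv track=rewrite | github.com/TheJacksonLaboratory/STQ | lib/from_pyfish.py | _create_ordering
-- ===== SOURCE A (Python) =====
-- def _create_ordering(cur_tree, cur_clone):
--     """Create index for population DataFrame.
--
--     Recursively traverses the parent tree.
--     Build a list such that children are listed between two instances of parent.
--     """
--     res = []
--     if cur_clone in cur_tree.keys():
--         res += [cur_clone]
--         for child in cur_tree[cur_clone]:
--             res += _create_ordering(cur_tree, child)
--         res += [cur_clone]
--     else:
--         return [cur_clone]
--     return res
-- ===== SOURCE B (Python) =====
-- def _create_ordering(cur_tree, cur_clone):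
--     """Iterative version: explicit stack of ('visit', node) / ('emit', node) work items."""
--     res = []
--     stack = [('visit', cur_clone)]
--     while stack:
--         tag, x = stack.pop()
--         if tag == 'emit':
--             res.append(x)
--             continue
--         children = cur_tree.get(x)
--         if children is None:
--             res.append(x)
--         else:
--             res.append(x)
--             stack.append(('emit', x))
--             for child in reversed(children):
--                 stack.append(('visit', child))
--     return res
-- ===== Notes on version B (the rewrite author's own statement) =====
-- stated objective: alternative
-- what changed: The recursive parent-tree traversal is replaced by an iterative loop over an explicit stack of tagged visit/emit work items (no recursion).
import Mathlib
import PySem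

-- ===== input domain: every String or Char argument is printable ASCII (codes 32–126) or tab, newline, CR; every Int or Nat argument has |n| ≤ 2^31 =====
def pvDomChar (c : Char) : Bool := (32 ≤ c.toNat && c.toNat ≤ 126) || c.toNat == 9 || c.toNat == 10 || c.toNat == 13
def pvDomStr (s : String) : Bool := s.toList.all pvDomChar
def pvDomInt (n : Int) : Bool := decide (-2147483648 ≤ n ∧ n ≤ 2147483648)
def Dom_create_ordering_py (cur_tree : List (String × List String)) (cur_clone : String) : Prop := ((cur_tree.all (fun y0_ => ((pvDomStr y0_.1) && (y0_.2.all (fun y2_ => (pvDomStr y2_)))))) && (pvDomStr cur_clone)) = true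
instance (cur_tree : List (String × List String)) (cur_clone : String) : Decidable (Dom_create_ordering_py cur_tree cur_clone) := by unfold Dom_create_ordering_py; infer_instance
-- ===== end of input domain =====

-- B replaces the recursive traversal by an iterative loop over an explicit stack of visit/emit
-- work items (alternative decomposition, same cost); return values agree on all of Pre_.

-- first-match association-list lookup: exact port of Python's `x in d` / `d[x]` / `d.get(x)` on the dict
def pvGet (t : List (String × List String)) (x : String) : Option (List String) :=
  (t.find? (fun p => p.1 == x)).map (fun p => p.2)

-- ===== PORT A =====
-- fuel makes the (possibly non-terminating) Python recursion total; `none` = fuel exhausted,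
-- which Pre_ rules out (fuel t.length+1 is enough on acyclic inputs, proved below)
def pvGoA (t : List (String × List String)) : Nat → String → Option (List String)
  | 0, _ => none
  | (m+1), x =>
    match pvGet t x with
    | some cs =>
        -- res = [cur_clone]; for child in cs: res += rec(child); res += [cur_clone]
        (cs.foldl (fun acc child => acc.bind (fun r => (pvGoA t m child).map (fun l => r ++ l)))
          (some [x])).map (fun body => body ++ [x])
    | none => some [x]

def create_ordering_py (cur_tree : List (String × List String)) (cur_clone : String) : List String :=
  (pvGoA cur_tree (cur_tree.length + 1) cur_clone).getD []

-- ===== PORT B =====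
inductive PvItem : Type
  | visit : String → PvItem
  | emit : String → PvItem
deriving DecidableEq, Repr

-- stack is head-as-top; Python's `for child in reversed(cs): stack.append(('visit', child))`
-- followed by popping is the same as prepending cs in order.  fuel = totality guard only.
def pvGoB (t : List (String × List String)) : Nat → List PvItem → List String → Option (List String)
  | _, [], res => some res
  | 0, _ :: _, _ => none
  | (m+1), (PvItem.emit x) :: st, res => pvGoB t m st (res ++ [x])
  | (m+1), (PvItem.visit x) :: st, res =>
    match pvGet t x with
    | some cs => pvGoB t m (cs.map PvItem.visit ++ PvItem.emit x :: st) (res ++ [x])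
    | none => pvGoB t m st (res ++ [x])

def create_ordering_py_alt (cur_tree : List (String × List String)) (cur_clone : String) : List String :=
  let C := cur_tree.foldl (fun m p => max m p.2.length) 0
  (pvGoB cur_tree ((C + 2) ^ (cur_tree.length + 1)) [PvItem.visit cur_clone] []).getD []

-- ===== PRECONDITION & SPEC =====
def pvChild (t : List (String × List String)) (x : String) : List String := (pvGet t x).getD []

-- `pvReachB t m x y` : y is reachable from x by 1..m child-edges
def pvReachB (t : List (String × List String)) : Nat → String → String → Bool
  | 0, _, _ => false
  | (m+1), x, y => (pvChild t x).any (fun c => c == y || pvReachB t m c y)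

-- Pre_ excludes inputs on which some key reachable from cur_clone (or equal to it) lies on a
-- cycle of the parent tree: there Python A recurses forever (RecursionError), returning nothing.
def Pre_create_ordering_py (cur_tree : List (String × List String)) (cur_clone : String) : Prop :=
  ∀ p ∈ cur_tree, (p.1 = cur_clone ∨ pvReachB cur_tree cur_tree.length cur_clone p.1 = true) →
    pvReachB cur_tree cur_tree.length p.1 p.1 = false
instance (cur_tree : List (String × List String)) (cur_clone : String) : Decidable (Pre_create_ordering_py cur_tree cur_clone) := by unfold Pre_create_ordering_py; infer_instance

def pvWitness_create_ordering_py : (List (String × List String)) × String :=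
  ([("a", ["b", "b"]), ("b", ["c"])], "a")

def Spec_create_ordering_py (cur_tree : List (String × List String)) (cur_clone : String) (out : List String) : Prop := out = create_ordering_py_alt cur_tree cur_clone
instance (cur_tree : List (String × List String)) (cur_clone : String) (out : List String) : Decidable (Spec_create_ordering_py cur_tree cur_clone out) := by unfold Spec_create_ordering_py; infer_instance

-- ===== CLAIM (what is proved, stated in full; the proofs are below) =====
def Claim_equal_create_ordering_py : Prop := ∀ (cur_tree : List (String × List String)) (cur_clone : String), Dom_create_ordering_py cur_tree cur_clone → Pre_create_ordering_py cur_tree cur_clone → Spec_create_ordering_py cur_tree cur_clone (create_ordering_py cur_tree cur_clone)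

-- ===== LEMMAS AND PROOFS =====

-- the one-step child relation, reachability as a Prop, and explicit edge-paths
def PvStep (t : List (String × List String)) (x y : String) : Prop := y ∈ pvChild t x

def PvChain (t : List (String × List String)) : String → List String → Prop
  | _, [] => True
  | x, b :: l => PvStep t x b ∧ PvChain t b l

lemma pvChain_cons {t : List (String × List String)} {x b : String} {l : List String} :
    PvChain t x (b :: l) ↔ PvStep t x b ∧ PvChain t b l := Iff.rfl

lemma pvGet_mem {t : List (String × List String)} {x : String} {cs : List String}
    (h : pvGet t x = some cs) : (x, cs) ∈ t := by
  unfold pvGet at h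
  obtain ⟨p, hp, hpe⟩ := Option.map_eq_some_iff.mp h
  have hmem := List.mem_of_find?_eq_some hp
  have hpred := List.find?_some hp
  have : p.1 = x := by simpa using hpred
  cases p
  simp_all

lemma step_key {t : List (String × List String)} {x y : String}
    (h : PvStep t x y) : x ∈ t.map Prod.fst := by
  unfold PvStep pvChild at h
  cases hg : pvGet t x with
  | none => simp [hg] at h
  | some cs => exact List.mem_map.mpr ⟨(x, cs), pvGet_mem hg, rfl⟩

lemma reachB_sound {t : List (String × List String)} :
    ∀ (m : Nat) (x y : String), pvReachB t m x y = true → Relation.TransGen (PvStep t) x y := by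
  intro m
  induction m with
  | zero => intro x y h; simp [pvReachB] at h
  | succ m ih =>
    intro x y h
    simp only [pvReachB] at h
    rw [List.any_eq_true] at h
    obtain ⟨ch, hch, hor⟩ := h
    rcases Bool.or_eq_true_iff.mp hor with h1 | h2
    · have : ch = y := by simpa using h1
      exact Relation.TransGen.single (this ▸ hch)
    · exact Relation.TransGen.head hch (ih ch y h2)

lemma chain_reachB {t : List (String × List String)} {y : String} :
    ∀ (l : List String) (x : String), PvChain t x (l ++ [y]) →
      pvReachB t (l.length + 1) x y = true := by
  intro l
  induction l with
  | nil =>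
    intro x h
    rw [List.nil_append, pvChain_cons] at h
    simp only [pvReachB, List.length_nil]
    rw [List.any_eq_true]
    exact ⟨y, h.1, by simp⟩
  | cons b lb ih =>
    intro x h
    rw [List.cons_append, pvChain_cons] at h
    simp only [pvReachB, List.length_cons]
    rw [List.any_eq_true]
    refine ⟨b, h.1, ?_⟩
    rw [Bool.or_eq_true_iff]
    exact Or.inr (ih b h.2)

lemma reachB_succ {t : List (String × List String)} :
    ∀ (m : Nat) (x y : String), pvReachB t m x y = true → pvReachB t (m+1) x y = true := by
  intro m
  induction m with
  | zero => intro x y h; simp [pvReachB] at h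
  | succ m ih =>
    intro x y h
    simp only [pvReachB] at h ⊢
    rw [List.any_eq_true] at h ⊢
    obtain ⟨ch, hch, hor⟩ := h
    refine ⟨ch, hch, ?_⟩
    rw [Bool.or_eq_true_iff] at hor ⊢
    rcases hor with h1 | h2
    · exact Or.inl h1
    · exact Or.inr (ih ch y h2)

lemma reachB_mono {t : List (String × List String)} {m m' : Nat} (hle : m ≤ m')
    {x y : String} (h : pvReachB t m x y = true) : pvReachB t m' x y = true := by
  induction m' with
  | zero =>
    have : m = 0 := by omega
    subst this
    exact h
  | succ m' ih =>
    rcases Nat.lt_or_ge m (m'+1) with hlt | hge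
    · exact reachB_succ m' x y (ih (by omega))
    · have : m = m' + 1 := by omega
      exact this ▸ h

lemma chain_suffix {t : List (String × List String)} {b : String} {l₂ : List String} :
    ∀ (l₁ : List String) (x : String), PvChain t x (l₁ ++ b :: l₂) → PvChain t b l₂ := by
  intro l₁
  induction l₁ with
  | nil => intro x h; rw [List.nil_append, pvChain_cons] at h; exact h.2
  | cons a l₁ ih =>
    intro x h
    rw [List.cons_append, pvChain_cons] at h
    exact ih a h.2

lemma chain_snoc {t : List (String × List String)} {b y : String} :
    ∀ (l : List String) (x : String), PvChain t x (l ++ [b]) → PvStep t b y →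
      PvChain t x (l ++ [b, y]) := by
  intro l
  induction l with
  | nil =>
    intro x h hby
    rw [List.nil_append, pvChain_cons] at h
    rw [List.nil_append, pvChain_cons]
    exact ⟨h.1, hby, trivial⟩
  | cons a l ih =>
    intro x h hby
    rw [List.cons_append, pvChain_cons] at h
    rw [List.cons_append, pvChain_cons]
    exact ⟨h.1, ih a h.2 hby⟩

lemma reach_chain {t : List (String × List String)} {x y : String}
    (h : Relation.TransGen (PvStep t) x y) :
    ∃ l : List String, PvChain t x (l ++ [y]) := by
  induction h with
  | single hs => exact ⟨[], ⟨hs, trivial⟩⟩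
  | @tail b c _ hbc ih =>
    obtain ⟨l, hl⟩ := ih
    refine ⟨l ++ [b], ?_⟩
    have h2 := chain_snoc l x hl hbc
    simpa using h2

lemma prune {t : List (String × List String)} {y : String} :
    ∀ (N : Nat) (l : List String) (x : String), l.length ≤ N →
      PvChain t x (l ++ [y]) →
      ∃ l', l' ⊆ l ∧ l'.length ≤ l.length ∧ (x :: l').Nodup ∧
        PvChain t x (l' ++ [y]) := by
  intro N
  induction N with
  | zero =>
    intro l x hlen hch
    have : l = [] := List.length_eq_zero_iff.mp (by omega)
    subst this
    exact ⟨[], by simp, by simp, by simp, hch⟩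
  | succ N ih =>
    intro l x hlen hch
    by_cases hx : x ∈ l
    · obtain ⟨l₁, l₂, rfl⟩ := List.append_of_mem hx
      have hre : (l₁ ++ x :: l₂) ++ [y] = l₁ ++ x :: (l₂ ++ [y]) := by simp
      rw [hre] at hch
      have hch₂ := chain_suffix l₁ x hch
      have hlen₂ : l₂.length ≤ N := by simp [List.length_append] at hlen; omega
      obtain ⟨l', hsub, hl', hnd, hc⟩ := ih l₂ x hlen₂ hch₂
      refine ⟨l', fun a ha => ?_, by simp [List.length_append]; omega, hnd, hc⟩
      exact List.mem_append.mpr (Or.inr (List.mem_cons_of_mem _ (hsub ha)))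
    · cases l with
      | nil => exact ⟨[], by simp, by simp, by simp, hch⟩
      | cons b lb =>
        rw [List.cons_append, pvChain_cons] at hch
        obtain ⟨l', hsub, hl', hnd, hc⟩ := ih lb b (by simp at hlen; omega) hch.2
        refine ⟨b :: l', ?_, by simp; omega, ?_, ?_⟩
        · intro a ha
          rcases List.mem_cons.mp ha with rfl | ha
          · exact List.mem_cons_self
          · exact List.mem_cons_of_mem _ (hsub ha)
        · rw [List.nodup_cons]
          refine ⟨?_, hnd⟩
          intro hxm
          rcases List.mem_cons.mp hxm with rfl | hxm
          · exact hx List.mem_cons_self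
          · exact hx (List.mem_cons_of_mem _ (hsub hxm))
        · rw [List.cons_append, pvChain_cons]
          exact ⟨hch.1, hc⟩

lemma chain_sources {t : List (String × List String)} {y : String} :
    ∀ (l : List String) (x z : String), PvChain t x (l ++ [y]) →
      z ∈ x :: l → ∃ w, PvStep t z w := by
  intro l
  induction l with
  | nil =>
    intro x z hch hz
    rw [List.nil_append, pvChain_cons] at hch
    have : z = x := by simpa using hz
    exact ⟨y, this ▸ hch.1⟩
  | cons b lb ih =>
    intro x z hch hz
    rw [List.cons_append, pvChain_cons] at hch
    rcases List.mem_cons.mp hz with rfl | hz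
    · exact ⟨b, hch.1⟩
    · exact ih b z hch.2 hz

lemma reachB_complete {t : List (String × List String)} {x y : String}
    (h : Relation.TransGen (PvStep t) x y) : pvReachB t t.length x y = true := by
  obtain ⟨l, hl⟩ := reach_chain h
  obtain ⟨l', hsub, _, hnd, hc⟩ := prune l.length l x le_rfl hl
  have hkeys : ∀ z ∈ x :: l', z ∈ t.map Prod.fst := by
    intro z hz
    obtain ⟨w, hw⟩ := chain_sources l' x z hc hz
    exact step_key hw
  have hsp : List.Subperm (x :: l') (t.map Prod.fst) := List.subperm_of_subset hnd hkeys
  have hlen : l'.length + 1 ≤ t.length := by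
    have := hsp.length_le
    simpa using this
  exact reachB_mono hlen (chain_reachB l' x hc)

-- measure: number of names in the key column that are x or reachable from x
def pvMu (t : List (String × List String)) (x : String) : Nat :=
  ((t.map Prod.fst).filter (fun k => k == x || pvReachB t t.length x k)).length

lemma pvMu_le (t : List (String × List String)) (x : String) : pvMu t x ≤ t.length := by
  unfold pvMu
  calc ((t.map Prod.fst).filter _).length ≤ (t.map Prod.fst).length :=
        List.length_filter_le _ _
    _ = t.length := by simp

lemma pvMu_lt {t : List (String × List String)} {x : String} {cs : List String} {ch : String}
    (hget : pvGet t x = some cs) (hch : ch ∈ cs)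
    (hx : ¬ Relation.TransGen (PvStep t) x x) : pvMu t ch < pvMu t x := by
  have hstep : PvStep t x ch := by unfold PvStep pvChild; rw [hget]; simpa using hch
  have himp : ∀ k : String, (k == ch || pvReachB t t.length ch k) = true →
      (k == x || pvReachB t t.length x k) = true := by
    intro k hk
    rcases Bool.or_eq_true_iff.mp hk with h1 | h2
    · have : k = ch := by simpa using h1
      subst this
      exact Bool.or_eq_true_iff.mpr (Or.inr (reachB_complete (Relation.TransGen.single hstep)))
    · exact Bool.or_eq_true_iff.mpr (Or.inr (reachB_complete
        (Relation.TransGen.head hstep (reachB_sound _ _ _ h2))))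
  have hsub : List.Sublist
      ((t.map Prod.fst).filter (fun k => k == ch || pvReachB t t.length ch k))
      ((t.map Prod.fst).filter (fun k => k == x || pvReachB t t.length x k)) :=
    List.monotone_filter_right _ himp
  have hxin : x ∈ (t.map Prod.fst).filter (fun k => k == x || pvReachB t t.length x k) := by
    rw [List.mem_filter]
    exact ⟨List.mem_map.mpr ⟨(x, cs), pvGet_mem hget, rfl⟩, by simp⟩
  have hxout : x ∉ (t.map Prod.fst).filter (fun k => k == ch || pvReachB t t.length ch k) := by
    rw [List.mem_filter]
    rintro ⟨-, hp⟩
    rcases Bool.or_eq_true_iff.mp hp with h1 | h2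
    · have : x = ch := by simpa using h1
      exact hx (Relation.TransGen.single (this ▸ hstep))
    · exact hx (Relation.TransGen.head hstep (reachB_sound _ _ _ h2))
  unfold pvMu
  rcases Nat.lt_or_ge
    ((t.map Prod.fst).filter (fun k => k == ch || pvReachB t t.length ch k)).length
    ((t.map Prod.fst).filter (fun k => k == x || pvReachB t t.length x k)).length with hlt | hge
  · exact hlt
  · exfalso
    have heq := hsub.eq_of_length (le_antisymm hsub.length_le hge)
    exact hxout (heq ▸ hxin)

-- reachable-from-cur_clone (or equal to it)
def PvRC (t : List (String × List String)) (c x : String) : Prop :=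
  x = c ∨ Relation.TransGen (PvStep t) c x

lemma pvRC_child {t : List (String × List String)} {c x : String} {cs : List String} {ch : String}
    (hrc : PvRC t c x) (hget : pvGet t x = some cs) (hch : ch ∈ cs) : PvRC t c ch := by
  have hstep : PvStep t x ch := by unfold PvStep pvChild; rw [hget]; simpa using hch
  rcases hrc with rfl | htg
  · exact Or.inr (Relation.TransGen.single hstep)
  · exact Or.inr (Relation.TransGen.tail htg hstep)

lemma pvNoloop {t : List (String × List String)} {c x : String} {cs : List String}
    (hpre : Pre_create_ordering_py t c) (hrc : PvRC t c x) (hget : pvGet t x = some cs) :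
    ¬ Relation.TransGen (PvStep t) x x := by
  intro htg
  have hmem : (x, cs) ∈ t := pvGet_mem hget
  have hx : pvReachB t t.length x x = false := by
    apply hpre (x, cs) hmem
    rcases hrc with rfl | hr
    · exact Or.inl rfl
    · exact Or.inr (reachB_complete hr)
  rw [reachB_complete htg] at hx
  exact Bool.true_eq_false.mp hx

-- Option-accumulator fold helpers for port A's inner loop
lemma foldO_none {F : String → Option (List String)} :
    ∀ (cs : List String), cs.foldl
      (fun acc child => acc.bind (fun r => (F child).map (fun l => r ++ l)))
      (none : Option (List String)) = none := by
  intro cs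
  induction cs with
  | nil => rfl
  | cons ch rest ih => simpa using ih

lemma foldO_eq {F : String → Option (List String)} {g : String → List String} :
    ∀ (cs : List String), (∀ ch ∈ cs, F ch = some (g ch)) → ∀ init : List String,
      cs.foldl (fun acc child => acc.bind (fun r => (F child).map (fun l => r ++ l)))
        (some init) = some (init ++ cs.flatMap g) := by
  intro cs
  induction cs with
  | nil => intro _ init; simp
  | cons ch rest ih =>
    intro h init
    have hch := h ch List.mem_cons_self
    simp only [List.foldl_cons, Option.bind_some, hch, Option.map_some]
    rw [ih (fun a ha => h a (List.mem_cons_of_mem _ ha))]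
    simp

lemma foldO_mono {F F' : String → Option (List String)}
    (hFF : ∀ x r, F x = some r → F' x = some r) :
    ∀ (cs : List String) (init out : List String),
      cs.foldl (fun acc child => acc.bind (fun r => (F child).map (fun l => r ++ l)))
        (some init) = some out →
      cs.foldl (fun acc child => acc.bind (fun r => (F' child).map (fun l => r ++ l)))
        (some init) = some out := by
  intro cs
  induction cs with
  | nil => intro init out h; simpa using h
  | cons ch rest ih =>
    intro init out h
    simp only [List.foldl_cons] at h ⊢
    cases hF : F ch with
    | none =>
      rw [hF] at h
      simp only [Option.bind_some, Option.map_none] at h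
      rw [foldO_none] at h
      exact absurd h (by simp)
    | some l =>
      rw [hF] at h
      rw [hFF ch l hF]
      simp only [Option.bind_some, Option.map_some] at h ⊢
      exact ih _ _ h

lemma pvGoA_mono {t : List (String × List String)} :
    ∀ (m : Nat) (x : String) (r : List String),
      pvGoA t m x = some r → pvGoA t (m+1) x = some r := by
  intro m
  induction m with
  | zero => intro x r h; simp [pvGoA] at h
  | succ m ih =>
    intro x r h
    cases hget : pvGet t x with
    | none => simp only [pvGoA, hget] at h ⊢; exact h
    | some cs =>
      simp only [pvGoA, hget] at h ⊢
      obtain ⟨body, hb, hbe⟩ := Option.map_eq_some_iff.mp h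
      have hb2 := foldO_mono (F := fun z => pvGoA t m z) (F' := fun z => pvGoA t (m+1) z)
        ih cs [x] body hb
      simp only [pvGoA] at hb2
      rw [hb2]
      simpa using hbe

lemma pvGoA_mono_le {t : List (String × List String)} {m m' : Nat} (hle : m ≤ m')
    {x : String} {r : List String} (h : pvGoA t m x = some r) : pvGoA t m' x = some r := by
  induction m' with
  | zero =>
    have : m = 0 := by omega
    subst this
    simp [pvGoA] at h
  | succ m' ih =>
    rcases Nat.lt_or_ge m (m'+1) with hlt | hge
    · exact pvGoA_mono m' x r (ih (by omega))
    · have : m = m' + 1 := by omega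
      exact this ▸ h

lemma pvGoA_some {t : List (String × List String)} {c : String}
    (hpre : Pre_create_ordering_py t c) :
    ∀ (m : Nat) (x : String), PvRC t c x → pvMu t x < m → ∃ r, pvGoA t m x = some r := by
  intro m
  induction m with
  | zero => intro x _ h; omega
  | succ m ih =>
    intro x hrc hmu
    cases hget : pvGet t x with
    | none => exact ⟨[x], by simp [pvGoA, hget]⟩
    | some cs =>
      have hnl := pvNoloop hpre hrc hget
      have hch : ∀ ch ∈ cs, pvGoA t m ch = some ((pvGoA t m ch).getD []) := by
        intro ch hchm
        obtain ⟨r, hr⟩ := ih ch (pvRC_child hrc hget hchm)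
          (by have := pvMu_lt hget hchm hnl; omega)
        simp [hr]
      refine ⟨[x] ++ cs.flatMap (fun ch => (pvGoA t m ch).getD []) ++ [x], ?_⟩
      simp only [pvGoA, hget]
      rw [foldO_eq cs hch [x]]
      simp

-- the canonical output of the traversal
def pvO (t : List (String × List String)) (x : String) : List String :=
  (pvGoA t (t.length + 1) x).getD []

lemma pvGoA_eq_O {t : List (String × List String)} {c : String}
    (hpre : Pre_create_ordering_py t c) {m : Nat} {x : String}
    (hrc : PvRC t c x) (hmu : pvMu t x < m) : pvGoA t m x = some (pvO t x) := by
  obtain ⟨r, hr⟩ := pvGoA_some hpre (pvMu t x + 1) x hrc (by omega)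
  have h1 : pvGoA t m x = some r := pvGoA_mono_le (by omega) hr
  have h2 : pvGoA t (t.length + 1) x = some r :=
    pvGoA_mono_le (by have := pvMu_le t x; omega) hr
  rw [h1]
  unfold pvO
  rw [h2]
  rfl

lemma pvO_leaf {t : List (String × List String)} {x : String} (hget : pvGet t x = none) :
    pvO t x = [x] := by
  unfold pvO
  simp [pvGoA, hget]

lemma pvO_key {t : List (String × List String)} {c : String}
    (hpre : Pre_create_ordering_py t c) {x : String} {cs : List String}
    (hrc : PvRC t c x) (hget : pvGet t x = some cs) :
    pvO t x = [x] ++ cs.flatMap (pvO t) ++ [x] := by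
  have hnl := pvNoloop hpre hrc hget
  have hch : ∀ ch ∈ cs, pvGoA t t.length ch = some (pvO t ch) := by
    intro ch hchm
    exact pvGoA_eq_O hpre (pvRC_child hrc hget hchm)
      (by have h1 := pvMu_lt hget hchm hnl; have h2 := pvMu_le t x; omega)
  have hgoal : pvGoA t (t.length + 1) x = some ([x] ++ cs.flatMap (pvO t) ++ [x]) := by
    simp only [pvGoA, hget]
    rw [foldO_eq cs hch [x]]
    simp
  unfold pvO
  rw [hgoal]
  rfl

lemma pvO_len_pos {t : List (String × List String)} {c : String}
    (hpre : Pre_create_ordering_py t c) {x : String} (hrc : PvRC t c x) :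
    1 ≤ (pvO t x).length := by
  cases hget : pvGet t x with
  | none => simp [pvO_leaf hget]
  | some cs => simp [pvO_key hpre hrc hget]

-- the max-children bound used as B's fuel
def pvC (t : List (String × List String)) : Nat :=
  t.foldl (fun m p => max m p.2.length) 0

lemma foldl_max_le_init :
    ∀ (t : List (String × List String)) (init : Nat),
      init ≤ t.foldl (fun m p => max m p.2.length) init := by
  intro t
  induction t with
  | nil => intro init; simp
  | cons p rest ih =>
    intro init
    calc init ≤ max init p.2.length := le_max_left _ _
      _ ≤ _ := ih _

lemma mem_len_le_foldl_max :
    ∀ (t : List (String × List String)) (p : String × List String), p ∈ t →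
      ∀ init : Nat, p.2.length ≤ t.foldl (fun m q => max m q.2.length) init := by
  intro t
  induction t with
  | nil => intro p hp; simp at hp
  | cons q rest ih =>
    intro p hp init
    rcases List.mem_cons.mp hp with rfl | hp
    · calc p.2.length ≤ max init p.2.length := le_max_right _ _
        _ ≤ _ := foldl_max_le_init rest _
    · exact ih p hp _

lemma pvC_bound {t : List (String × List String)} {x : String} {cs : List String}
    (hget : pvGet t x = some cs) : cs.length ≤ pvC t :=
  mem_len_le_foldl_max t (x, cs) (pvGet_mem hget) 0

lemma flat_len_le {g : String → List String} {B : Nat} :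
    ∀ (cs : List String), (∀ ch ∈ cs, (g ch).length ≤ B) →
      (cs.flatMap g).length ≤ cs.length * B := by
  intro cs
  induction cs with
  | nil => intro _; simp
  | cons ch rest ih =>
    intro h
    have h1 := h ch List.mem_cons_self
    have h2 := ih (fun a ha => h a (List.mem_cons_of_mem _ ha))
    simp only [List.flatMap_cons, List.length_append, List.length_cons]
    calc (g ch).length + (rest.flatMap g).length ≤ B + rest.length * B := by omega
      _ = (rest.length + 1) * B := by ring

lemma pvO_len_le {t : List (String × List String)} {c : String}
    (hpre : Pre_create_ordering_py t c) :
    ∀ (m : Nat) (x : String), PvRC t c x → pvMu t x < m →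
      (pvO t x).length ≤ (pvC t + 2) ^ m := by
  intro m
  induction m with
  | zero => intro x _ h; omega
  | succ m ih =>
    intro x hrc hmu
    cases hget : pvGet t x with
    | none =>
      rw [pvO_leaf hget]
      simpa using Nat.one_le_pow (m+1) (pvC t + 2) (by omega)
    | some cs =>
      have hnl := pvNoloop hpre hrc hget
      rw [pvO_key hpre hrc hget]
      have hflat : (cs.flatMap (pvO t)).length ≤ cs.length * (pvC t + 2) ^ m :=
        flat_len_le cs (fun ch hchm => ih ch (pvRC_child hrc hget hchm)
          (by have := pvMu_lt hget hchm hnl; omega))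
      have hcs := pvC_bound hget
      have hpow : 1 ≤ (pvC t + 2) ^ m := Nat.one_le_pow m (pvC t + 2) (by omega)
      simp only [List.length_append, List.length_cons, List.length_nil]
      have hmul : cs.length * (pvC t + 2) ^ m ≤ pvC t * (pvC t + 2) ^ m :=
        Nat.mul_le_mul_right _ hcs
      calc 1 + (cs.flatMap (pvO t)).length + 1 ≤ pvC t * (pvC t + 2) ^ m + 2 := by omega
        _ ≤ (pvC t + 2) * (pvC t + 2) ^ m := by nlinarith
        _ = (pvC t + 2) ^ (m + 1) := by ring

-- meaning of a stack item
def pvM (t : List (String × List String)) : PvItem → List String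
  | PvItem.visit x => pvO t x
  | PvItem.emit x => [x]

lemma pvGoB_sim {t : List (String × List String)} {c : String}
    (hpre : Pre_create_ordering_py t c) :
    ∀ (F : Nat) (st : List PvItem) (res : List String),
      (∀ x, PvItem.visit x ∈ st → PvRC t c x) →
      (st.flatMap (pvM t)).length ≤ F →
      pvGoB t F st res = some (res ++ st.flatMap (pvM t)) := by
  intro F
  induction F with
  | zero =>
    intro st res hok hlen
    cases st with
    | nil => simp [pvGoB]
    | cons i st' =>
      exfalso
      have h1 : 1 ≤ (pvM t i).length := by
        cases i with
        | visit x => exact pvO_len_pos hpre (hok x (by simp))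
        | emit x => simp [pvM]
      rw [List.flatMap_cons, List.length_append] at hlen
      omega
  | succ F ih =>
    intro st res hok hlen
    cases st with
    | nil => simp [pvGoB]
    | cons i st' =>
      cases i with
      | emit x =>
        rw [List.flatMap_cons, List.length_append] at hlen
        have hm : (pvM t (PvItem.emit x)).length = 1 := rfl
        simp only [pvGoB]
        rw [ih st' (res ++ [x]) (fun z hz => hok z (List.mem_cons_of_mem _ hz)) (by omega)]
        simp [pvM]
      | visit x =>
        have hrcx : PvRC t c x := hok x (by simp)
        cases hget : pvGet t x with
        | none =>
          rw [List.flatMap_cons, List.length_append] at hlen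
          have hm : (pvM t (PvItem.visit x)).length = (pvO t x).length := rfl
          have hp := pvO_len_pos hpre hrcx
          simp only [pvGoB, hget]
          rw [ih st' (res ++ [x]) (fun z hz => hok z (List.mem_cons_of_mem _ hz)) (by omega)]
          simp [pvM, pvO_leaf hget]
        | some cs =>
          simp only [pvGoB, hget]
          have hok' : ∀ z, PvItem.visit z ∈ cs.map PvItem.visit ++ PvItem.emit x :: st' →
              PvRC t c z := by
            intro z hz
            rcases List.mem_append.mp hz with hz | hz
            · obtain ⟨w, hw, he⟩ := List.mem_map.mp hz
              cases he
              exact pvRC_child hrcx hget hw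
            · rcases List.mem_cons.mp hz with he | hz
              · exact absurd he (by simp)
              · exact hok z (List.mem_cons_of_mem _ hz)
          have hflat : ((cs.map PvItem.visit ++ PvItem.emit x :: st').flatMap (pvM t))
              = cs.flatMap (pvO t) ++ [x] ++ st'.flatMap (pvM t) := by
            rw [List.flatMap_append, List.flatMap_cons, List.flatMap_map]
            have hcomp : (fun a => pvM t (PvItem.visit a)) = pvO t := rfl
            rw [hcomp]
            simp [pvM]
          have hOx : pvM t (PvItem.visit x) = [x] ++ cs.flatMap (pvO t) ++ [x] := by
            have : pvM t (PvItem.visit x) = pvO t x := rfl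
            rw [this, pvO_key hpre hrcx hget]
          have hlen' : ((cs.map PvItem.visit ++ PvItem.emit x :: st').flatMap (pvM t)).length
              ≤ F := by
            rw [hflat]
            rw [List.flatMap_cons, List.length_append, hOx] at hlen
            simp only [List.length_append, List.length_cons, List.length_nil] at hlen ⊢
            omega
          rw [ih _ (res ++ [x]) hok' hlen']
          rw [hflat, List.flatMap_cons, hOx]
          simp

-- ===== VERDICT (by name: the statement is the Claim_ definition above) =====
theorem create_ordering_py_spec : Claim_equal_create_ordering_py := by
  unfold Claim_equal_create_ordering_py
  intro t c _ hpre
  unfold Spec_create_ordering_py create_ordering_py create_ordering_py_alt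
  have hrc : PvRC t c c := Or.inl rfl
  have hA : pvGoA t (t.length + 1) c = some (pvO t c) :=
    pvGoA_eq_O hpre hrc (by have := pvMu_le t c; omega)
  have hBlen : (([PvItem.visit c] : List PvItem).flatMap (pvM t)).length ≤
      (pvC t + 2) ^ (t.length + 1) := by
    rw [List.flatMap_cons, List.flatMap_nil, List.append_nil]
    exact pvO_len_le hpre (t.length + 1) c hrc (by have := pvMu_le t c; omega)
  have hB := pvGoB_sim hpre ((pvC t + 2) ^ (t.length + 1)) [PvItem.visit c] []
    (by intro z hz
        rcases List.mem_cons.mp hz with he | hz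
        · cases he; exact hrc
        · simp at hz) hBlen
  rw [hA]
  show pvO t c = (pvGoB t ((pvC t + 2) ^ (t.length + 1)) [PvItem.visit c] []).getD []
  rw [hB]
  simp [pvM]
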